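-- pv_equiv track=rewrite | github.com/Yi-JaN/Pythons | python(M3) 遞迴函數 數字拆解.py | answer
-- ===== SOURCE A (Python) =====
-- def answer(n,str1) : #把下方的數丟上來遞迴裡
--     if n==0 :       #如果n是0進入
--       if str1!="" :    #進入後假設剛剛有遞迴str1就不等於空的字串值,就丟進去並且直接
--           return str1  #return不下函數名稱str1 然後沒下函數名稱,之後返回就不會再丟入遞迴函數裡
--       else :           # str1是空的就丟進這並且直接n轉str給str1之後直接return
--           str1=str(n)+" "   #不下函數名稱直接返回 下方 並且不在丟入遞迴函數裡
--           return str1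
--     else :             #如果n有值丟這
--         str1=str(n%10)+" "+str1 #str1一次一次n%10取,取值轉str後再" "1格,之後加目前的str1之後丟給str1做生成值
--         n=n//10           #每一次n%10取值完後,丟到這n//10取商,之後return在下函數名稱,把除完的n跟做生成值OK後
--         return answer(n,str1) #的str1丟進去之後返回到下方,那這邊有下函數名稱,所以會在兩個值都遞迴回來
-- ===== SOURCE B (Python) =====
-- def answer(n, str1):
--     # Closed form: the recursion emits n's decimal digits most-significant first,
--     # each followed by a space, in front of str1; n==0 keeps A's quirk naturally.
--     if n == 0:
--         return str1 if str1 != "" else "0 "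
--     return " ".join(str(n)) + " " + str1
-- ===== Notes on version B (the rewrite author's own statement) =====
-- stated objective: idiomatic
-- what changed: Replaces the %10///10 tail recursion by a closed form: join the characters of str(n) with spaces and prepend to str1 (no arithmetic, no recursion); the n==0 branch is kept as is. Pre_ excludes n<0, where A recurses forever (no return).
import Mathlib
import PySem

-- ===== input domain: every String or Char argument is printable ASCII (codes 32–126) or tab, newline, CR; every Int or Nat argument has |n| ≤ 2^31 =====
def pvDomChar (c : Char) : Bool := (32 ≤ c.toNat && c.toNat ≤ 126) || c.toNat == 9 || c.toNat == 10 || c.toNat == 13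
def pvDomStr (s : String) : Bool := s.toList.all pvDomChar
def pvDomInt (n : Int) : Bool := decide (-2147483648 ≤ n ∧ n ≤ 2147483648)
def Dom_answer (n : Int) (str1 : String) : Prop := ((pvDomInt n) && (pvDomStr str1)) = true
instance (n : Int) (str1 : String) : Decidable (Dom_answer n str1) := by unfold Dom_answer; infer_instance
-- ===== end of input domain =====

-- B replaces A's %10///10 tail recursion by a closed form (join the decimal digit
-- characters with spaces and prepend to str1); Pre_ excludes n < 0, where A never returns.


-- ===== PORT A =====
-- A recurses as answer(n//10, str(n%10)+" "+str1).  On Pre_ (0 ≤ n) Python's % and //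
-- coincide with Nat's % and /, so the port recurses on n.toNat; for n < 0 the Python
-- never returns (infinite recursion), and the toNat wrapper only totalises the port there.
def answerGo (m : Nat) (acc : List Char) : List Char :=
  if m = 0 then
    (if acc ≠ [] then acc else PySem.Int.toChars ((0 : Nat) : Int) ++ [' '])
  else
    answerGo (m / 10) (PySem.Int.toChars ((m % 10 : Nat) : Int) ++ ' ' :: acc)
termination_by m
decreasing_by exact Nat.div_lt_self (Nat.pos_of_ne_zero (by assumption)) (by norm_num)

def answer (n : Int) (str1 : String) : String :=
  String.ofList (answerGo n.toNat str1.toList)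

-- ===== PORT B =====
def answer_alt (n : Int) (str1 : String) : String :=
  if n = 0 then
    (if str1 ≠ "" then str1 else "0 ")
  else
    String.ofList
      (PySem.Chars.join [' '] ((PySem.Int.toChars n).map (fun c => [c])) ++ ' ' :: str1.toList)

-- ===== PRECONDITION & SPEC =====
-- Pre_ excludes n < 0: there Python's A recurses forever (n//10 never reaches 0) and returns nothing.
def Pre_answer (n : Int) (str1 : String) : Prop := 0 ≤ n
instance (n : Int) (str1 : String) : Decidable (Pre_answer n str1) := by unfold Pre_answer; infer_instance
def pvWitness_answer : Int × String := (123, "ab")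

def Spec_answer (n : Int) (str1 : String) (out : String) : Prop := out = answer_alt n str1
instance (n : Int) (str1 : String) (out : String) : Decidable (Spec_answer n str1 out) := by unfold Spec_answer; infer_instance

-- ===== CLAIM (what is proved, stated in full; the proofs are below) =====
def Claim_equal_answer : Prop := ∀ (n : Int) (str1 : String), Dom_answer n str1 → Pre_answer n str1 → Spec_answer n str1 (answer n str1)

-- ===== LEMMAS AND PROOFS =====

-- each digit character followed by a space: the shape A's recursion builds in front of str1
def spdig (ds : List Char) : List Char := ds.flatMap (fun c => [c, ' '])

theorem spdig_append (xs ys : List Char) : spdig (xs ++ ys) = spdig xs ++ spdig ys := by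
  simp [spdig]

theorem toChars_natCast (k : Nat) : PySem.Int.toChars (k : Int) = Nat.toDigits 10 k := by
  simp [PySem.Int.toChars]

theorem answerGo_eq (m : Nat) : m ≠ 0 → ∀ acc, answerGo m acc = spdig (Nat.toDigits 10 m) ++ acc := by
  induction m using Nat.strong_induction_on with
  | _ m ih =>
    intro hm acc
    rw [answerGo]
    simp only [hm, if_false, toChars_natCast]
    by_cases h10 : m < 10
    · have hd : m / 10 = 0 := Nat.div_eq_of_lt h10
      have hmod : m % 10 = m := Nat.mod_eq_of_lt h10
      rw [hd, hmod, answerGo]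
      have hne : Nat.toDigits 10 m ++ ' ' :: acc ≠ [] := by simp
      simp only [hne, ne_eq, not_false_iff, if_true]
      rw [Nat.toDigits_of_lt_base h10]
      simp [spdig]
    · have hle : (10 : Nat) ≤ m := Nat.le_of_not_lt h10
      have hdne : m / 10 ≠ 0 := by
        have := Nat.one_le_div_iff (by norm_num : (0:Nat) < 10) |>.mpr hle
        omega
      rw [ih (m / 10) (Nat.div_lt_self (Nat.pos_of_ne_zero hm) (by norm_num)) hdne]
      rw [Nat.toDigits_of_base_le (by norm_num) hle, spdig_append,
        Nat.toDigits_of_lt_base (Nat.mod_lt m (by norm_num))]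
      simp [spdig]

theorem join_spaced (ds : List Char) : ds ≠ [] → ∀ acc : List Char,
    PySem.Chars.join [' '] (ds.map (fun c => [c])) ++ ' ' :: acc = spdig ds ++ acc := by
  induction ds with
  | nil => intro h; exact absurd rfl h
  | cons c rest ih =>
    intro _ acc
    cases rest with
    | nil => simp [PySem.Chars.join_singleton, spdig]
    | cons d rest' =>
      have hih := ih (by simp) acc
      simp only [List.map_cons, PySem.Chars.join_cons_cons, List.append_assoc] at hih ⊢
      rw [hih]
      simp [spdig]

-- ===== VERDICT (by name: the statement is the Claim_ definition above) =====
theorem answer_spec : Claim_equal_answer := by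
  intro n str1 _ hpre
  unfold Spec_answer answer answer_alt
  by_cases hn : n = 0
  · subst hn
    rw [if_pos rfl]
    simp only [Int.toNat_zero]
    rw [answerGo]
    by_cases hs : str1 = ""
    · subst hs
      simp only [String.toList_empty]
      norm_num
      decide
    · have hne : str1.toList ≠ [] := fun h => hs (String.toList_eq_nil_iff.mp h)
      simp only [hne, ne_eq, not_false_iff, if_true, hs, String.ofList_toList]
  · have hpos : 0 < n := lt_of_le_of_ne hpre (Ne.symm hn)
    have hmne : n.toNat ≠ 0 := by omega
    rw [if_neg hn, answerGo_eq n.toNat hmne str1.toList]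
    have hnneg : ¬ n < 0 := by omega
    have hch : PySem.Int.toChars n = Nat.toDigits 10 n.toNat := by
      simp [PySem.Int.toChars, hnneg]
    rw [hch, join_spaced (Nat.toDigits 10 n.toNat) (by
      have := @Nat.length_toDigits_pos 10 n.toNat
      intro h; rw [h] at this; simp at this)]
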